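-- pv_equiv track=rewrite | github.com/AhmedElAmraoui/QSE | src/vqe_and_qse/subspace.py | pauli_power_basis
-- ===== SOURCE A (Python) =====
-- from itertools import product
--
-- def pauli_multiply(p1, p2):
--     """
--     Multipliziert zwei Pauli-Strings (als Strings) und gibt das Ergebnis zurück.
--     Global phases werden ignoriert.
--     """
--     result = []
--     for a, b in zip(p1, p2):
--         if a == 'I':
--             result.append(b)
--         elif b == 'I':
--             result.append(a)
--         elif a == b:
--             result.append('I')
--         else:
--             # Pauli multiplication table without phase
--             ab = {('X','Y'):'Z', ('Y','X'):'Z',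
--                   ('Y','Z'):'X', ('Z','Y'):'X',
--                   ('Z','X'):'Y', ('X','Z'):'Y'}
--             result.append(ab.get((a,b), ab.get((b,a))))
--     return ''.join(result)
--
-- def pauli_power_basis(pauli_strings, k):
--     """
--     Gibt alle Pauli-Strings zurück, die durch Produkte von bis zu k Hamiltonian-Terms entstehen.
--     """
--     if k == 0:
--         return {'I' * len(pauli_strings[0])}
--     elif k == 1:
--         return set(pauli_strings)
--
--     previous = pauli_power_basis(pauli_strings, k-1)
--     result = set()
--     for p_prev, p in product(previous, pauli_strings):
--         result.add(pauli_multiply(p_prev, p))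
--     return result
-- ===== SOURCE B (Python) =====
-- def pauli_power_basis(pauli_strings, k):
--     """
--     Iterative re-implementation: products of exactly k terms, built level by level.
--     Pauli multiplication (phase ignored) is done via the XOR encoding I,X,Y,Z -> 0,1,2,3.
--     """
--     if k == 0:
--         return {'I' * len(pauli_strings[0])}
--     idx = {'I': 0, 'X': 1, 'Y': 2, 'Z': 3}
--     letters = 'IXYZ'
--     result = set(pauli_strings)
--     for _ in range(k - 1):
--         result = {''.join(letters[idx[a] ^ idx[b]] for a, b in zip(p, q))
--                   for p in result for q in pauli_strings}
--     return result
-- ===== Notes on version B (the rewrite author's own statement) =====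
-- stated objective: alternative
-- what changed: Replaces the top-down recursion on k with an iterative bottom-up loop (result = set(pauli_strings), then k-1 set-comprehension passes), and replaces the branch/dict Pauli multiplication with the XOR encoding I,X,Y,Z -> 0,1,2,3 (letters[idx[a]^idx[b]]).
-- outside the precondition, e.g. on pauli_power_basis(['AA'], 2): A returns {'II'}, B raises KeyError; on pauli_power_basis(['AB'], 3): A returns {'AB'}, B raises KeyError
import Mathlib
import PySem

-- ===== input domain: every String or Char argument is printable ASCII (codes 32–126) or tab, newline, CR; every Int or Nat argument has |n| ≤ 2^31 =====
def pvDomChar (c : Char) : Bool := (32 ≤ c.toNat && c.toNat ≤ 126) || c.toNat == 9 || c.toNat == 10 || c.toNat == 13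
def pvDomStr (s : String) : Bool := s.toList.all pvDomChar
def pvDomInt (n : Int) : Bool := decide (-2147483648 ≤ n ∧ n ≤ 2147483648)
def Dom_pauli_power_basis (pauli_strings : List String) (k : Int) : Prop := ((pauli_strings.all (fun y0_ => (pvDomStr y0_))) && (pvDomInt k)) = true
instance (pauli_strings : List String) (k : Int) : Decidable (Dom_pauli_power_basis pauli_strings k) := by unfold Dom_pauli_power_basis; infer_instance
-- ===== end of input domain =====

-- B replaces A's top-down recursion on k by an iterative level-by-level loop and A's
-- branch/dict Pauli multiplication by the XOR encoding I,X,Y,Z -> 0,1,2,3 (alternative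
-- decomposition, same cost).  Outputs are Python sets; equality below is of the PySem.Set lists.

-- ===== PORT A =====
-- the dict 'ab' of pauli_multiply (a fixed literal lookup table)
def pvTblA (p : Char × Char) : Option Char :=
  match p with
  | ('X','Y') => some 'Z' | ('Y','X') => some 'Z'
  | ('Y','Z') => some 'X' | ('Z','Y') => some 'X'
  | ('Z','X') => some 'Y' | ('X','Z') => some 'Y'
  | _ => none

-- one iteration of pauli_multiply's loop body; '?' stands for Python's None (on which
-- ''.join raises TypeError) — such inputs are excluded by Pre_pauli_power_basis
def pvCharA (a b : Char) : Char :=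
  if a = 'I' then b
  else if b = 'I' then a
  else if a = b then 'I'
  else (pvTblA (a, b)).getD ((pvTblA (b, a)).getD '?')

def pauli_multiply (p1 p2 : String) : String :=
  String.ofList ((p1.toList.zip p2.toList).map (fun ab => pvCharA ab.1 ab.2))

-- A's 'result = set(); for p_prev, p in product(previous, pauli_strings): result.add(...)'
def pvStepA (pauli_strings prev : List String) : PySem.Set String :=
  prev.foldl (fun acc pp =>
    pauli_strings.foldl (fun acc2 p => PySem.Set.add acc2 (pauli_multiply pp p)) acc)
    PySem.Set.empty

-- 'I' * len(pauli_strings[0]); pauli_strings = [] is an IndexError, excluded by Pre_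
def pvIdentA (pauli_strings : List String) : String :=
  String.ofList (List.replicate (PySem.Str.len ((PySem.List.pyGet? pauli_strings 0).getD "")).toNat 'I')

-- A's recursion, on the nonnegative recursion depth
def pvAuxA (pauli_strings : List String) : Nat → List String
  | 0 => [pvIdentA pauli_strings]
  | 1 => PySem.Set.ofList pauli_strings
  | n + 2 => pvStepA pauli_strings (pvAuxA pauli_strings (n + 1))

-- for k < 0 Python A recurses without bound (RecursionError) — excluded by Pre_
def pauli_power_basis (pauli_strings : List String) (k : Int) : List String :=
  if k < 0 then [] else pvAuxA pauli_strings k.toNat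

-- ===== PORT B =====
-- the dict 'idx'; 4 stands for Python's KeyError (outside Pre_)
def pvIdxB (c : Char) : Nat :=
  if c = 'I' then 0 else if c = 'X' then 1 else if c = 'Y' then 2 else if c = 'Z' then 3 else 4

-- letters[idx[a] ^ idx[b]]; '?' stands for the out-of-range IndexError (outside Pre_)
def pvCharB (a b : Char) : Char :=
  (['I','X','Y','Z'] : List Char).getD (Nat.xor (pvIdxB a) (pvIdxB b)) '?'

def pvMulB (p q : String) : String :=
  String.ofList ((p.toList.zip q.toList).map (fun ab => pvCharB ab.1 ab.2))

-- B's set comprehension {mul(p, q) for p in result for q in pauli_strings}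
def pvStepB (pauli_strings prev : List String) : PySem.Set String :=
  PySem.Set.ofList (prev.flatMap (fun p => pauli_strings.map (fun q => pvMulB p q)))

def pvIdentB (pauli_strings : List String) : String :=
  String.ofList (List.replicate (PySem.Str.len ((PySem.List.pyGet? pauli_strings 0).getD "")).toNat 'I')

def pauli_power_basis_alt (pauli_strings : List String) (k : Int) : List String :=
  if k = 0 then [pvIdentB pauli_strings]
  else (PySem.List.pyRange 0 (k - 1) 1).foldl (fun res _ => pvStepB pauli_strings res)
        (PySem.Set.ofList pauli_strings)

-- ===== PRECONDITION & SPEC =====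
-- Pre_ excludes: k < 0 (A: RecursionError) and k = 0 on [] (A: IndexError); for k ≥ 2 it
-- restricts the strings to the Pauli alphabet I/X/Y/Z, because two distinct non-Pauli
-- characters make pauli_multiply produce None and ''.join raise TypeError — a few
-- non-Pauli inputs whose character pairs happen to be equal or 'I' still return in A and
-- are excluded here (B raises KeyError on them).
def Pre_pauli_power_basis (pauli_strings : List String) (k : Int) : Prop :=
  0 ≤ k ∧ (k = 0 → pauli_strings ≠ []) ∧
  (2 ≤ k → ∀ s ∈ pauli_strings, ∀ c ∈ s.toList, c ∈ (['I','X','Y','Z'] : List Char))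

instance (pauli_strings : List String) (k : Int) : Decidable (Pre_pauli_power_basis pauli_strings k) := by
  unfold Pre_pauli_power_basis; infer_instance

def pvWitness_pauli_power_basis : List String × Int := (["X"], 1)

def Spec_pauli_power_basis (pauli_strings : List String) (k : Int) (out : List String) : Prop := out = pauli_power_basis_alt pauli_strings k
instance (pauli_strings : List String) (k : Int) (out : List String) : Decidable (Spec_pauli_power_basis pauli_strings k out) := by unfold Spec_pauli_power_basis; infer_instance

-- ===== CLAIM (what is proved, stated in full; the proofs are below) =====
def Claim_equal_pauli_power_basis : Prop := ∀ (pauli_strings : List String) (k : Int), Dom_pauli_power_basis pauli_strings k → Pre_pauli_power_basis pauli_strings k → Spec_pauli_power_basis pauli_strings k (pauli_power_basis pauli_strings k)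

-- ===== LEMMAS AND PROOFS =====

-- all characters of all strings are Pauli letters
def pvAllP (l : List String) : Prop :=
  ∀ s ∈ l, ∀ c ∈ s.toList, c ∈ (['I','X','Y','Z'] : List Char)

theorem pvCharAB {a b : Char} (ha : a ∈ (['I','X','Y','Z'] : List Char))
    (hb : b ∈ (['I','X','Y','Z'] : List Char)) :
    pvCharA a b = pvCharB a b ∧ pvCharB a b ∈ (['I','X','Y','Z'] : List Char) := by
  fin_cases ha <;> fin_cases hb <;> decide

theorem pvMulAB {p q : String}
    (hp : ∀ c ∈ p.toList, c ∈ (['I','X','Y','Z'] : List Char))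
    (hq : ∀ c ∈ q.toList, c ∈ (['I','X','Y','Z'] : List Char)) :
    pauli_multiply p q = pvMulB p q := by
  unfold pauli_multiply pvMulB
  congr 1
  refine List.map_congr_left (fun ab hab => ?_)
  obtain ⟨h1, h2⟩ := List.of_mem_zip hab
  exact (pvCharAB (hp _ h1) (hq _ h2)).1

theorem pvMulBP {p q : String}
    (hp : ∀ c ∈ p.toList, c ∈ (['I','X','Y','Z'] : List Char))
    (hq : ∀ c ∈ q.toList, c ∈ (['I','X','Y','Z'] : List Char)) :
    ∀ c ∈ (pvMulB p q).toList, c ∈ (['I','X','Y','Z'] : List Char) := by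
  intro c hc
  unfold pvMulB at hc
  rw [String.toList_ofList] at hc
  obtain ⟨ab, hab, rfl⟩ := List.mem_map.mp hc
  obtain ⟨h1, h2⟩ := List.of_mem_zip hab
  exact (pvCharAB (hp _ h1) (hq _ h2)).2

theorem pvOfListP {l : List String} (h : pvAllP l) : pvAllP (PySem.Set.ofList l) := by
  intro s hs
  exact h s ((PySem.List.mem_dedup _ _).mp hs)

theorem pvStepBP {ps prev : List String} (hps : pvAllP ps) (hprev : pvAllP prev) :
    pvAllP (pvStepB ps prev) := by
  intro s hs
  unfold pvStepB at hs
  obtain ⟨p, hp, hmem⟩ := List.mem_flatMap.mp ((PySem.List.mem_dedup _ _).mp hs)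
  obtain ⟨q, hq, rfl⟩ := List.mem_map.mp hmem
  exact pvMulBP (hprev p hp) (hps q hq)

theorem pvStepAB {ps prev : List String} (hps : pvAllP ps) (hprev : pvAllP prev) :
    pvStepA ps prev = pvStepB ps prev := by
  unfold pvStepA pvStepB
  rw [PySem.Set.ofList_eq_foldl, List.foldl_flatMap]
  refine List.foldl_ext _ _ _ (fun acc pp hpp => ?_)
  rw [List.foldl_map]
  refine List.foldl_ext _ _ acc (fun acc2 q hq => ?_)
  rw [pvMulAB (hprev pp hpp) (hps q hq)]

-- A's level n+1 equals n iterations of B's step, and all its strings stay Pauli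
theorem pvIterAB {ps : List String} (hps : pvAllP ps) :
    ∀ n : Nat, pvAuxA ps (n + 1) = (pvStepB ps)^[n] (PySem.Set.ofList ps) ∧
      pvAllP ((pvStepB ps)^[n] (PySem.Set.ofList ps)) := by
  intro n
  induction n with
  | zero => exact ⟨rfl, pvOfListP hps⟩
  | succ m ih =>
    refine ⟨?_, ?_⟩
    · show pvStepA ps (pvAuxA ps (m + 1)) = _
      rw [ih.1, pvStepAB hps ih.2, Function.iterate_succ_apply']
    · rw [Function.iterate_succ_apply']
      exact pvStepBP hps ih.2

-- ===== VERDICT (by name: the statement is the Claim_ definition above) =====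
theorem pauli_power_basis_spec : Claim_equal_pauli_power_basis := by
  intro ps k _ hpre
  obtain ⟨hk0, hne, hpauli⟩ := hpre
  unfold Spec_pauli_power_basis pauli_power_basis pauli_power_basis_alt
  rw [if_neg (by omega)]
  by_cases hk : k = 0
  · subst hk
    simp [pvAuxA, pvIdentA, pvIdentB]
  · rw [if_neg hk]
    have hk1 : 1 ≤ k := by omega
    rw [PySem.List.pyRange_one, List.foldl_map, List.foldl_const]
    have hlen : k.toNat = (k - 1 - 0).toNat + 1 := by omega
    rw [hlen, List.length_range]
    by_cases hk2 : k = 1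
    · subst hk2; rfl
    · exact (pvIterAB (hpauli (by omega)) (k - 1 - 0).toNat).1
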